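-- pv_equiv track=rewrite | github.com/KristofferFJ/PE | 401 - Sum of squares of divisors.py | s_of_divisor_squares
-- ===== SOURCE A (Python) =====
-- def s_of_squares(n):
--     # Summen af 1^2 + 2^2 + ... + n^2 udover at jeg ikke dividerer med 6.
--     # Gemmer det til sidste for kun at dividere én gang.
--     return int(n*(n+1)*(2*n+1))
--
-- def s_of_divisor_squares(n):
--     s = 0
--     i = 1
--     while i < n + 1:
--         num = n//i
--         repeats = n//num - i + 1
--         s = (s + repeats*s_of_squares(num))
--         i += repeats
--     s = (s//6) % 10**9
--     return s, i
-- ===== SOURCE B (Python) =====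
-- def s_of_divisor_squares(n):
--     # Dirichlet hyperbola method for sum_{d<=n} d*d*(n//d):
--     # split pairs (j,k) with j*k<=n at r=isqrt(n); one flat loop to r.
--     if n < 1:
--         return 0, 1
--     r = 1
--     while (r + 1) * (r + 1) <= n:
--         r += 1
--     total = 0
--     for d in range(1, r + 1):
--         q = n // d
--         total += d * d * q + q * (q + 1) * (2 * q + 1) // 6
--     total -= r * (r * (r + 1) * (2 * r + 1) // 6)
--     return total % 10 ** 9, n + 1
-- ===== Notes on version B (the rewrite author's own statement) =====
-- stated objective: alternative
-- what changed: Replaces A's quotient-block jumping (grouping equal n//i runs, multiplying the Gauss formula by each run length, dividing by 6 at the end) with the Dirichlet hyperbola method: one flat loop d = 1..isqrt(n) accumulating d*d*(n//d) plus the square-sum up to n//d, then subtracting the isqrt(n) x square-sum overlap; no run-length bookkeeping.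
import Mathlib
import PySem

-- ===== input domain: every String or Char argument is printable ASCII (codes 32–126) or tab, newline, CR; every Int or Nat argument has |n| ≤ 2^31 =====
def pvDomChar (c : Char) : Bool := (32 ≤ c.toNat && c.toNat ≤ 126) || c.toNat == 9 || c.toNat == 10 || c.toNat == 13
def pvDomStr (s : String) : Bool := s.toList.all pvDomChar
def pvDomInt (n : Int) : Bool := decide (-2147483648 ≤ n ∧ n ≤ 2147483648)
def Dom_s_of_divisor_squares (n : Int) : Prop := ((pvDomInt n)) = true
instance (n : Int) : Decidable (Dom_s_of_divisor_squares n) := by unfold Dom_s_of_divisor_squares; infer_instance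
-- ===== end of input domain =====

-- B replaces A's quotient-block jumping with the Dirichlet hyperbola method (an alternative O(sqrt n)-style loop; no speed claim).


-- ===== PORT A =====
-- s_of_squares(n) = int(n*(n+1)*(2*n+1))
def pvSOfSquares (n : Int) : Int := n * (n + 1) * (2 * n + 1)

-- the while loop of A, with a fuel parameter for totality only (imax iterations is n, fuel below suffices)
def pvALoop (n : Int) : Nat → Int → Int → Int × Int
  | 0, s, i => (s, i)
  | fuel + 1, s, i =>
    if i < n + 1 then
      let num := PySem.Int.floordiv n i
      let repeats := PySem.Int.floordiv n num - i + 1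
      pvALoop n fuel (s + repeats * pvSOfSquares num) (i + repeats)
    else (s, i)

def s_of_divisor_squares (n : Int) : Int × Int :=
  let r := pvALoop n (n.toNat + 1) 0 1
  (PySem.Int.mod (PySem.Int.floordiv r.1 6) (10 ^ 9), r.2)

-- ===== PORT B =====
-- integer square root loop of B (fuel for totality only)
def pvIsqrtLoop (n : Int) : Nat → Int → Int
  | 0, r => r
  | fuel + 1, r => if (r + 1) * (r + 1) ≤ n then pvIsqrtLoop n fuel (r + 1) else r

def s_of_divisor_squares_alt (n : Int) : Int × Int :=
  if n < 1 then (0, 1)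
  else
    let r := pvIsqrtLoop n (n.toNat + 1) 1
    let total := (PySem.List.pyRange 1 (r + 1) 1).foldl
      (fun total d =>
        let q := PySem.Int.floordiv n d
        total + (d * d * q + PySem.Int.floordiv (q * (q + 1) * (2 * q + 1)) 6)) 0
    let total := total - r * PySem.Int.floordiv (r * (r + 1) * (2 * r + 1)) 6
    (PySem.Int.mod total (10 ^ 9), n + 1)

-- ===== PRECONDITION & SPEC =====
def Spec_s_of_divisor_squares (n : Int) (out : Int × Int) : Prop := out = s_of_divisor_squares_alt n
instance (n : Int) (out : Int × Int) : Decidable (Spec_s_of_divisor_squares n out) := by unfold Spec_s_of_divisor_squares; infer_instance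

-- ===== CLAIM (what is proved, stated in full; the proofs are below) =====
def Claim_equal_s_of_divisor_squares : Prop := ∀ (n : Int), Dom_s_of_divisor_squares n → Spec_s_of_divisor_squares n (s_of_divisor_squares n)

-- ===== LEMMAS AND PROOFS =====

-- the square-sum and the flat divisor sum, over ℕ
def pvQn (m : ℕ) : ℕ := ∑ k ∈ Finset.Icc 1 m, k * k
def pvP (m : ℕ) : ℕ := m * (m + 1) * (2 * m + 1)
def pvT (N : ℕ) : ℕ := ∑ k ∈ Finset.Icc 1 N, k * k * (N / k)

theorem pv_gauss (m : ℕ) : pvP m = 6 * pvQn m := by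
  unfold pvQn
  induction m with
  | zero => simp [pvP]
  | succ m ih =>
    rw [Finset.sum_Icc_succ_top (by omega)]
    unfold pvP at *
    ring_nf
    ring_nf at ih
    omega

-- the quotient N / j is constant on A's blocks
theorem pv_block_const (N i j : ℕ) (hi : 1 ≤ i) (hij : i ≤ j) (hj : j ≤ N / (N / i)) :
    N / j = N / i := by
  have hq : 1 ≤ N / i := by
    have : i ≤ N := by
      by_contra h
      have : N / i = 0 := Nat.div_eq_of_lt (by omega)
      simp [this] at hj
      omega
    exact Nat.one_le_div_iff (by omega) |>.mpr this
  have h1 : N / j ≤ N / i := Nat.div_le_div_left hij (by omega)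
  have h2 : N / i ≤ N / j := by
    have hjN : j * (N / i) ≤ N := (Nat.le_div_iff_mul_le (by omega : 0 < N / i)).mp hj
    exact (Nat.le_div_iff_mul_le (by omega : 0 < j)).mpr (by rw [Nat.mul_comm]; exact hjN)
  omega

theorem pv_filter_eq (N k : ℕ) (hk : 1 ≤ k) :
    (Finset.Icc 1 N).filter (fun x => k * x ≤ N) = Finset.Icc 1 (N / k) := by
  ext x
  simp only [Finset.mem_filter, Finset.mem_Icc]
  constructor
  · rintro ⟨⟨h1, _⟩, h3⟩
    exact ⟨h1, (Nat.le_div_iff_mul_le (by omega)).mpr (by rw [Nat.mul_comm]; exact h3)⟩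
  · rintro ⟨h1, h2⟩
    have h3 : x * k ≤ N := (Nat.le_div_iff_mul_le (by omega)).mp h2
    have h4 : x ≤ x * k := Nat.le_mul_of_pos_right x (by omega)
    exact ⟨⟨h1, by omega⟩, by rw [Nat.mul_comm]; exact h3⟩

-- lower-bounded variant, condition in the form x * k ≤ N
theorem pv_filter_eq' (N a k : ℕ) (hk : 1 ≤ k) :
    (Finset.Icc a N).filter (fun x => x * k ≤ N) = Finset.Icc a (N / k) := by
  ext x
  simp only [Finset.mem_filter, Finset.mem_Icc]
  constructor
  · rintro ⟨⟨h1, _⟩, h3⟩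
    exact ⟨h1, (Nat.le_div_iff_mul_le (by omega)).mpr h3⟩
  · rintro ⟨h1, h2⟩
    have h3 : x * k ≤ N := (Nat.le_div_iff_mul_le (by omega)).mp h2
    have h4 : x ≤ x * k := Nat.le_mul_of_pos_right x (by omega)
    exact ⟨⟨h1, by omega⟩, h3⟩

-- splitting an Icc sum at an interior point
theorem pv_sum_Icc_split (f : ℕ → ℕ) (i e N : ℕ) (_h1 : 1 ≤ i) (h2 : i ≤ e + 1) (h3 : e ≤ N) :
    ∑ j ∈ Finset.Icc i N, f j = (∑ j ∈ Finset.Icc i e, f j) + ∑ j ∈ Finset.Icc (e + 1) N, f j := by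
  have hu : Finset.Icc i N = Finset.Icc i e ∪ Finset.Icc (e + 1) N := by
    ext x
    simp only [Finset.mem_Icc, Finset.mem_union]
    omega
  have hd : Disjoint (Finset.Icc i e) (Finset.Icc (e + 1) N) := by
    rw [Finset.disjoint_left]
    intro a ha hb
    simp only [Finset.mem_Icc] at ha hb
    omega
  rw [hu, Finset.sum_union hd]

-- one block of A's loop, summed
theorem pv_block_sum (N i : ℕ) (h1 : 1 ≤ i) (h2 : i ≤ N) :
    ∑ j ∈ Finset.Icc i (N / (N / i)), pvP (N / j) = (N / (N / i) - i + 1) * pvP (N / i) := by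
  have hie : i ≤ N / (N / i) := by
    have hq : 1 ≤ N / i := (Nat.one_le_div_iff (by omega)).mpr h2
    refine (Nat.le_div_iff_mul_le (by omega)).mpr ?_
    rw [Nat.mul_comm]
    exact Nat.div_mul_le_self N i
  rw [Finset.sum_congr rfl
    (fun j hj => by rw [pv_block_const N i j h1 (Finset.mem_Icc.mp hj).1 (Finset.mem_Icc.mp hj).2])]
  rw [Finset.sum_const, Nat.card_Icc, smul_eq_mul]
  congr 1
  omega

-- the pair sum over j*k ≤ N, collapsed along k
theorem pv_pairs (N : ℕ) :
    ∑ j ∈ Finset.Icc 1 N, ∑ k ∈ Finset.Icc 1 N, (if j * k ≤ N then k * k else 0) = pvT N := by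
  unfold pvT
  rw [Finset.sum_comm]
  refine Finset.sum_congr rfl (fun k hk => ?_)
  have hfc : (Finset.Icc 1 N).filter (fun j => j * k ≤ N)
      = (Finset.Icc 1 N).filter (fun x => x * k ≤ N) := by
    apply Finset.filter_congr
    intro j _
    simp
  rw [← Finset.sum_filter, hfc, pv_filter_eq' N 1 k (Finset.mem_Icc.mp hk).1,
    Finset.sum_const, Nat.card_Icc, smul_eq_mul]
  have hc : N / k + 1 - 1 = N / k := by simp
  rw [hc, Nat.mul_comm]

-- divisor swap: A's summed blocks equal 6 times B's flat sum
theorem pv_swap (N : ℕ) : ∑ j ∈ Finset.Icc 1 N, pvP (N / j) = 6 * pvT N := by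
  calc ∑ j ∈ Finset.Icc 1 N, pvP (N / j)
      = 6 * ∑ j ∈ Finset.Icc 1 N, pvQn (N / j) := by
        rw [Finset.mul_sum]
        exact Finset.sum_congr rfl (fun j _ => pv_gauss _)
    _ = 6 * ∑ j ∈ Finset.Icc 1 N, ∑ k ∈ Finset.Icc 1 N, if j * k ≤ N then k * k else 0 := by
        congr 1
        refine Finset.sum_congr rfl (fun j hj => ?_)
        unfold pvQn
        rw [← pv_filter_eq N j (Finset.mem_Icc.mp hj).1, Finset.sum_filter]
    _ = 6 * pvT N := by rw [pv_pairs]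

-- the Dirichlet hyperbola identity behind B, in subtraction-free form
theorem pv_hyperbola (N : ℕ) (hN : 1 ≤ N) :
    ∑ d ∈ Finset.Icc 1 (Nat.sqrt N), (d * d * (N / d) + pvQn (N / d))
      = pvT N + Nat.sqrt N * pvQn (Nat.sqrt N) := by
  have h1R : 1 ≤ Nat.sqrt N := Nat.sqrt_pos.mpr (by omega)
  have hRN : Nat.sqrt N ≤ N := Nat.sqrt_le_self N
  have hRR : Nat.sqrt N * Nat.sqrt N ≤ N := by simpa [pow_two] using Nat.sqrt_le' N
  have hlt : N < (Nat.sqrt N + 1) * (Nat.sqrt N + 1) := by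
    simpa [pow_two, Nat.succ_eq_add_one] using Nat.lt_succ_sqrt' N
  set R := Nat.sqrt N with hR
  -- tail of the pair sum (indices j > R), collapsed along j
  have htail : ∑ j ∈ Finset.Icc (R + 1) N, ∑ k ∈ Finset.Icc 1 N, (if j * k ≤ N then k * k else 0)
      = ∑ k ∈ Finset.Icc 1 R, (N / k - R) * (k * k) := by
    rw [Finset.sum_comm]
    have hall : ∀ k ∈ Finset.Icc 1 N,
        (∑ j ∈ Finset.Icc (R + 1) N, if j * k ≤ N then k * k else 0)
          = (N / k - R) * (k * k) := by
      intro k hk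
      have hk1 : 1 ≤ k := (Finset.mem_Icc.mp hk).1
      have hfc : (Finset.Icc (R + 1) N).filter (fun j => j * k ≤ N)
          = (Finset.Icc (R + 1) N).filter (fun x => x * k ≤ N) := by
        apply Finset.filter_congr
        intro j _
        simp
      rw [← Finset.sum_filter, hfc, pv_filter_eq' N (R + 1) k hk1,
        Finset.sum_const, Nat.card_Icc, smul_eq_mul]
      congr 1
      omega
    rw [Finset.sum_congr rfl hall]
    -- terms with k > R vanish
    rw [pv_sum_Icc_split (fun k => (N / k - R) * (k * k)) 1 R N (by omega) (by omega) hRN]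
    have hzero : ∑ k ∈ Finset.Icc (R + 1) N, (N / k - R) * (k * k) = 0 := by
      refine Finset.sum_eq_zero (fun k hk => ?_)
      have hk1 : R + 1 ≤ k := (Finset.mem_Icc.mp hk).1
      have hdle : N / k ≤ N / (R + 1) := Nat.div_le_div_left hk1 (by omega)
      have hdlt : N / (R + 1) < R + 1 := (Nat.div_lt_iff_lt_mul (by omega)).mpr hlt
      have : N / k - R = 0 := by omega
      rw [this, Nat.zero_mul]
    rw [hzero, Nat.add_zero]
  -- each left-over term: (N/k - R) + R = N/k for k ≤ R
  have hdiv_ge : ∀ k ∈ Finset.Icc 1 R, R ≤ N / k := by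
    intro k hk
    obtain ⟨hk1, hkR⟩ := Finset.mem_Icc.mp hk
    refine (Nat.le_div_iff_mul_le (by omega)).mpr ?_
    calc R * k ≤ R * R := Nat.mul_le_mul_left R hkR
      _ ≤ N := hRR
  calc ∑ d ∈ Finset.Icc 1 R, (d * d * (N / d) + pvQn (N / d))
      = (∑ d ∈ Finset.Icc 1 R, d * d * (N / d)) + ∑ d ∈ Finset.Icc 1 R, pvQn (N / d) := by
        rw [Finset.sum_add_distrib]
    _ = ((∑ k ∈ Finset.Icc 1 R, (N / k - R) * (k * k)) + R * pvQn R)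
        + ∑ d ∈ Finset.Icc 1 R, pvQn (N / d) := by
        congr 1
        unfold pvQn
        rw [Finset.mul_sum, ← Finset.sum_add_distrib]
        refine Finset.sum_congr rfl (fun k hk => ?_)
        have := hdiv_ge k hk
        have hres : (N / k - R) * (k * k) + R * (k * k) = (N / k) * (k * k) := by
          rw [← Nat.add_mul]
          congr 1
          omega
        rw [hres, Nat.mul_comm]
    _ = pvT N + R * pvQn R := by
        rw [← pv_pairs N,
          pv_sum_Icc_split (fun j => ∑ k ∈ Finset.Icc 1 N, if j * k ≤ N then k * k else 0)
            1 R N (by omega) (by omega) hRN, htail]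
        have hinner : ∀ j ∈ Finset.Icc 1 R,
            (∑ k ∈ Finset.Icc 1 N, if j * k ≤ N then k * k else 0) = pvQn (N / j) := by
          intro j hj
          have hj1 : 1 ≤ j := (Finset.mem_Icc.mp hj).1
          unfold pvQn
          rw [← pv_filter_eq N j hj1, Finset.sum_filter]
        rw [Finset.sum_congr rfl hinner]
        ring

-- B's floor division of the Gauss polynomial by 6 is exact
theorem pv_floordiv6 (m : ℕ) :
    PySem.Int.floordiv ((m : Int) * ((m : Int) + 1) * (2 * (m : Int) + 1)) 6 = ((pvQn m : ℕ) : Int) := by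
  have hP : (m : Int) * ((m : Int) + 1) * (2 * (m : Int) + 1) = ((pvP m : ℕ) : Int) := by
    unfold pvP
    push_cast
    ring
  rw [hP, pv_gauss m]
  have h6 : ((6 * pvQn m : ℕ) : Int) = (pvQn m : ℤ) * 6 := by push_cast; ring
  rw [h6, PySem.Int.floordiv_eq_ediv_of_pos (by norm_num : (0:Int) < 6),
    Int.mul_ediv_cancel _ (by norm_num : (6:Int) ≠ 0)]

-- characterisation of B's isqrt loop
theorem pv_isqrt (N : ℕ) : ∀ (fuel r : ℕ), 1 ≤ r → r ≤ Nat.sqrt N → Nat.sqrt N - r < fuel →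
    pvIsqrtLoop (N : Int) fuel (r : Int) = ((Nat.sqrt N : ℕ) : Int) := by
  intro fuel
  induction fuel with
  | zero => intro r h1 h2 h3; omega
  | succ fuel ih =>
    intro r h1 h2 h3
    by_cases hr : r < Nat.sqrt N
    · rw [pvIsqrtLoop, if_pos]
      · have hc : ((r : Int) + 1) = ((r + 1 : ℕ) : Int) := by push_cast; ring
        rw [hc, ih (r + 1) (by omega) (by omega) (by omega)]
      · have hle : (r + 1) * (r + 1) ≤ N := by
          simpa [pow_two] using Nat.le_sqrt'.mp (show r + 1 ≤ Nat.sqrt N by omega)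
        exact_mod_cast hle
    · have hreq : r = Nat.sqrt N := by omega
      rw [pvIsqrtLoop, if_neg, hreq]
      intro hcon
      have hle : (r + 1) * (r + 1) ≤ N := by exact_mod_cast hcon
      have : r + 1 ≤ Nat.sqrt N := Nat.le_sqrt'.mpr (by simpa [pow_two] using hle)
      omega

-- characterisation of B's summation loop
theorem pv_bfold (N : ℕ) : ∀ (R : ℕ) (t : Int),
    (PySem.List.pyRange 1 ((R : Int) + 1) 1).foldl
      (fun total d =>
        let q := PySem.Int.floordiv (N : Int) d
        total + (d * d * q + PySem.Int.floordiv (q * (q + 1) * (2 * q + 1)) 6)) t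
      = t + ((∑ d ∈ Finset.Icc 1 R, (d * d * (N / d) + pvQn (N / d)) : ℕ) : Int) := by
  intro R
  induction R with
  | zero =>
    intro t
    rw [PySem.List.pyRange_one_eq_nil (by norm_num)]
    simp
  | succ R ih =>
    intro t
    have hc : ((R + 1 : ℕ) : Int) + 1 = ((R : Int) + 1) + 1 := by push_cast; ring
    rw [hc, PySem.List.pyRange_one_succ_right (by omega), List.foldl_append, ih t]
    simp only [List.foldl_cons, List.foldl_nil]
    have hd : PySem.Int.floordiv (N : Int) ((R : Int) + 1) = ((N / (R + 1) : ℕ) : Int) := by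
      have : ((R : Int) + 1) = ((R + 1 : ℕ) : Int) := by push_cast; ring
      rw [this, PySem.Int.floordiv_natCast]
    rw [hd, pv_floordiv6 (N / (R + 1)), Finset.sum_Icc_succ_top (by omega)]
    push_cast
    ring

-- characterisation of A's loop
theorem pv_aloop (N : ℕ) : ∀ (fuel i : ℕ) (s : Int), 1 ≤ i → i ≤ N + 1 → N + 2 - i ≤ fuel →
    pvALoop (N : Int) fuel s (i : Int) =
      (s + ((∑ j ∈ Finset.Icc i N, pvP (N / j) : ℕ) : Int), (N : Int) + 1) := by
  intro fuel
  induction fuel with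
  | zero => intro i s h1 h2 h3; omega
  | succ fuel ih =>
    intro i s h1 h2 h3
    by_cases hiN : i ≤ N
    · have hq : 1 ≤ N / i := (Nat.one_le_div_iff (by omega)).mpr hiN
      have hie : i ≤ N / (N / i) := by
        refine (Nat.le_div_iff_mul_le (by omega)).mpr ?_
        rw [Nat.mul_comm]
        exact Nat.div_mul_le_self N i
      have heN : N / (N / i) ≤ N := Nat.div_le_self _ _
      rw [pvALoop, if_pos (by omega)]
      simp only [PySem.Int.floordiv_natCast]
      have hsq : pvSOfSquares ((N / i : ℕ) : Int) = ((pvP (N / i) : ℕ) : Int) := by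
        unfold pvSOfSquares pvP
        push_cast
        ring
      have hs : s + (((N / (N / i) : ℕ) : Int) - (i : ℕ) + 1) * pvSOfSquares ((N / i : ℕ) : Int)
          = s + (((N / (N / i) - i + 1) * pvP (N / i) : ℕ) : Int) := by
        rw [hsq]
        have hcast : ((N / (N / i) : ℕ) : Int) - (i : ℕ) + 1 = ((N / (N / i) - i + 1 : ℕ) : Int) := by
          omega
        rw [hcast]
        push_cast
        ring
      have hi1 : ((i : ℕ) : Int) + (((N / (N / i) : ℕ) : Int) - (i : ℕ) + 1)
          = ((N / (N / i) + 1 : ℕ) : Int) := by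
        omega
      rw [hs, hi1, ih (N / (N / i) + 1) _ (by omega) (by omega) (by omega)]
      rw [pv_sum_Icc_split (fun j => pvP (N / j)) i (N / (N / i)) N h1 (by omega) heN,
        pv_block_sum N i h1 hiN]
      push_cast
      ring
    · have hi : i = N + 1 := by omega
      subst hi
      rw [pvALoop, if_neg (by omega)]
      rw [Finset.Icc_eq_empty (by omega)]
      simp

-- ===== VERDICT (by name: the statement is the Claim_ definition above) =====
theorem s_of_divisor_squares_spec : Claim_equal_s_of_divisor_squares := by
  intro n _
  unfold Spec_s_of_divisor_squares s_of_divisor_squares s_of_divisor_squares_alt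
  by_cases hn : 1 ≤ n
  · obtain ⟨N, rfl⟩ : ∃ N : ℕ, n = (N : Int) := ⟨n.toNat, by omega⟩
    have hN : 1 ≤ N := by exact_mod_cast hn
    have h1R : 1 ≤ Nat.sqrt N := Nat.sqrt_pos.mpr (by omega)
    have hRN : Nat.sqrt N ≤ N := Nat.sqrt_le_self N
    have ha := pv_aloop N (N + 1) 1 0 le_rfl (by omega) (by omega)
    simp only [Int.toNat_natCast]
    rw [if_neg (by omega)]
    rw [show ((1:ℕ):Int) = (1:Int) from rfl] at ha
    rw [ha]
    have hr : pvIsqrtLoop (N : Int) (N + 1) 1 = ((Nat.sqrt N : ℕ) : Int) := by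
      have := pv_isqrt N (N + 1) 1 le_rfl h1R (by omega)
      rw [show ((1:ℕ):Int) = (1:Int) from rfl] at this
      exact this
    rw [hr]
    simp only [zero_add]
    rw [pv_bfold N (Nat.sqrt N) 0]
    simp only [zero_add]
    rw [pv_hyperbola N hN]
    have hsub : ((pvT N + Nat.sqrt N * pvQn (Nat.sqrt N) : ℕ) : Int)
        - ((Nat.sqrt N : ℕ) : Int) * PySem.Int.floordiv
            (((Nat.sqrt N : ℕ) : Int) * (((Nat.sqrt N : ℕ) : Int) + 1)
              * (2 * ((Nat.sqrt N : ℕ) : Int) + 1)) 6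
        = ((pvT N : ℕ) : Int) := by
      rw [pv_floordiv6 (Nat.sqrt N)]
      push_cast
      ring
    rw [hsub]
    rw [pv_swap N]
    have h6 : ((6 * pvT N : ℕ) : Int) = (pvT N : ℤ) * 6 := by push_cast; ring
    rw [h6, PySem.Int.floordiv_eq_ediv_of_pos (by norm_num : (0:Int) < 6),
      Int.mul_ediv_cancel _ (by norm_num : (6:Int) ≠ 0)]
  · have hA : pvALoop n (n.toNat + 1) 0 1 = (0, 1) := by
      rw [pvALoop, if_neg (by omega)]
    rw [hA, if_pos (by omega)]
    norm_num [PySem.Int.floordiv_eq_ediv_of_pos (by norm_num : (0:Int) < 6),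
      PySem.Int.mod_eq_emod_of_pos (by norm_num : (0:Int) < 10 ^ 9)]
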